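-- pv_equiv track=rewrite | github.com/pypi-data/pypi-mirror-402 | packages/qqtools/qqtools-1.1.27-py3-none-any.whl/qqtools/plugins/qhyperconnect/qhc.py | get_permute_dims
-- ===== SOURCE A (Python) =====
-- def get_permute_dims(ndims, feature_dim):
--     if feature_dim < 0:
--         feature_dim += ndims
--     if not 0 <= feature_dim < ndims:
--         raise ValueError(f"feature_dim {feature_dim} out of range: [0, {ndims})")
--     _move_to_last = [i for i in range(ndims) if i != feature_dim] + [feature_dim]
--     _move_from_last = list(range(feature_dim)) + [ndims - 1] + [x - 1 for x in range(feature_dim + 1, ndims)]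
--     return _move_to_last, _move_from_last
-- ===== SOURCE B (Python) =====
-- def get_permute_dims(ndims, feature_dim):
--     if feature_dim < 0:
--         feature_dim += ndims
--     if not 0 <= feature_dim < ndims:
--         raise ValueError(f"feature_dim {feature_dim} out of range: [0, {ndims})")
--     # Move by list surgery instead of comprehensions + index arithmetic:
--     # extract the feature slot and re-place it with pop/append and pop/insert.
--     _move_to_last = list(range(ndims))
--     _move_to_last.append(_move_to_last.pop(feature_dim))
--     _move_from_last = list(range(ndims))
--     _move_from_last.insert(feature_dim, _move_from_last.pop())
--     return _move_to_last, _move_from_last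
-- ===== Notes on version B (the rewrite author's own statement) =====
-- stated objective: simpler
-- what changed: Replaces A's filter-comprehension and hand-derived index arithmetic with direct list surgery: both permutations are built from list(range(ndims)) by popping the feature slot and re-inserting it (append for move-to-last, insert at feature_dim for move-from-last).
import Mathlib
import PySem

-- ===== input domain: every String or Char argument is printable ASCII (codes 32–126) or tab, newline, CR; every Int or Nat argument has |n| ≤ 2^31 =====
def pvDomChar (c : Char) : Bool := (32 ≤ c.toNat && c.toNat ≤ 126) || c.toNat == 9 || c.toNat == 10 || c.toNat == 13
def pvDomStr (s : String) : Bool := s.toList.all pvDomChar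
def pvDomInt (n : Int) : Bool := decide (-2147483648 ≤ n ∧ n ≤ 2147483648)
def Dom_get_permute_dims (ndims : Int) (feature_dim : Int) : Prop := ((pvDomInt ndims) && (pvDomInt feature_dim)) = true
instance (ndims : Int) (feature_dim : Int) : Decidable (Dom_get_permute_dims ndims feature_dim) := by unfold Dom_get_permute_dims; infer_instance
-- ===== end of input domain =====

-- ===== PORT A =====
-- A as written: filter comprehension for _move_to_last, closed-form index arithmetic for
-- _move_from_last.  The ValueError branch is excluded by Pre_ (the port returns ([], []) there).
def get_permute_dims (ndims : Int) (feature_dim : Int) : List Int × List Int :=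
  let fd := if feature_dim < 0 then feature_dim + ndims else feature_dim
  if 0 ≤ fd ∧ fd < ndims then
    ((PySem.List.pyRange 0 ndims 1).filter (fun i => i != fd) ++ [fd],
     PySem.List.pyRange 0 fd 1 ++ [ndims - 1]
       ++ (PySem.List.pyRange (fd + 1) ndims 1).map (fun x => x - 1))
  else ([], [])

-- ===== PORT B =====
-- B builds list(range(ndims)) and moves the feature slot by pop/append and pop/insert.
-- pop never fails under Pre_; the 'none' arms (Python would raise IndexError) return the list unchanged.
def get_permute_dims_alt (ndims : Int) (feature_dim : Int) : List Int × List Int :=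
  let fd := if feature_dim < 0 then feature_dim + ndims else feature_dim
  if 0 ≤ fd ∧ fd < ndims then
    let r := PySem.List.pyRange 0 ndims 1
    let toLast := match PySem.List.pop? r fd with
      | some (v, rest) => rest ++ [v]
      | none => r
    let fromLast := match PySem.List.pop? r (-1) with
      | some (v, rest) => PySem.List.insert rest fd v
      | none => r
    (toLast, fromLast)
  else ([], [])

-- ===== PRECONDITION & SPEC =====
-- Pre_ excludes exactly the inputs where A raises ValueError: the normalized feature_dim
-- must lie in [0, ndims).
def Pre_get_permute_dims (ndims : Int) (feature_dim : Int) : Prop :=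
  let fd := if feature_dim < 0 then feature_dim + ndims else feature_dim
  0 ≤ fd ∧ fd < ndims
instance (ndims : Int) (feature_dim : Int) : Decidable (Pre_get_permute_dims ndims feature_dim) := by
  unfold Pre_get_permute_dims; infer_instance
def pvWitness_get_permute_dims : Int × Int := (5, -2)
def Spec_get_permute_dims (ndims : Int) (feature_dim : Int) (out : List Int × List Int) : Prop := out = get_permute_dims_alt ndims feature_dim
instance (ndims : Int) (feature_dim : Int) (out : List Int × List Int) : Decidable (Spec_get_permute_dims ndims feature_dim out) := by unfold Spec_get_permute_dims; infer_instance

-- ===== CLAIM (what is proved, stated in full; the proofs are below) =====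
def Claim_equal_get_permute_dims : Prop := ∀ (ndims : Int) (feature_dim : Int), Dom_get_permute_dims ndims feature_dim → Pre_get_permute_dims ndims feature_dim → Spec_get_permute_dims ndims feature_dim (get_permute_dims ndims feature_dim)

-- ===== LEMMAS AND PROOFS =====

-- filter (!= fd) over range(0,n) equals dropping the element at index fd (which IS fd).
theorem pv_filter_range (n fd : Int) (h0 : 0 ≤ fd) (h1 : fd < n) :
    (PySem.List.pyRange 0 n 1).filter (fun i => i != fd)
      = (PySem.List.pyRange 0 n 1).eraseIdx fd.toNat := by
  rw [PySem.List.pyRange_one_append 0 fd n h0 (le_of_lt h1), PySem.List.pyRange_one_cons h1]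
  have hl : (PySem.List.pyRange 0 fd 1).length = fd.toNat := by
    simp [PySem.List.length_pyRange_one]
  rw [List.filter_append, List.eraseIdx_append_of_length_le (le_of_eq hl)]
  rw [List.filter_eq_self.mpr, List.filter_cons_of_neg, List.filter_eq_self.mpr]
  · rw [hl]
    simp
  · intro x hx
    have := (PySem.List.mem_pyRange_one).1 hx
    simp; omega
  · simp
  · intro x hx
    have := (PySem.List.mem_pyRange_one).1 hx
    simp; omega

-- shifting range(fd+1, n) down by one gives range(fd, n-1)
theorem pv_map_sub (n fd : Int) :
    (PySem.List.pyRange (fd + 1) n 1).map (fun x => x - 1) = PySem.List.pyRange fd (n - 1) 1 := by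
  rw [PySem.List.pyRange_one, PySem.List.pyRange_one, List.map_map]
  have h : (n - (fd + 1)).toNat = (n - 1 - fd).toNat := by omega
  rw [h]
  congr 1
  funext k
  simp only [Function.comp_apply]
  omega

-- take/drop of range(0,m) at fd split it into range(0,fd) and range(fd,m)
theorem pv_take_drop (m fd : Int) (h0 : 0 ≤ fd) (h2 : fd ≤ m) :
    (PySem.List.pyRange 0 m 1).take fd.toNat = PySem.List.pyRange 0 fd 1 ∧
    (PySem.List.pyRange 0 m 1).drop fd.toNat = PySem.List.pyRange fd m 1 := by
  rw [PySem.List.pyRange_one_append 0 fd m h0 h2]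
  have hl : (PySem.List.pyRange 0 fd 1).length = fd.toNat := by
    simp [PySem.List.length_pyRange_one]
  constructor
  · rw [← hl, List.take_left]
  · rw [← hl, List.drop_left]

-- list(range(n)).pop(fd) returns fd and erases index fd
theorem pv_pop_fd (n fd : Int) (h0 : 0 ≤ fd) (h1 : fd < n) :
    PySem.List.pop? (PySem.List.pyRange 0 n 1) fd
      = some (fd, (PySem.List.pyRange 0 n 1).eraseIdx fd.toNat) := by
  have hlt : fd.toNat < (PySem.List.pyRange 0 n 1).length := by
    simp [PySem.List.length_pyRange_one]; omega
  have h := PySem.List.pop?_natCast (PySem.List.pyRange 0 n 1) fd.toNat hlt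
  rw [PySem.List.getElem_pyRange_one] at h
  have hc : ((fd.toNat : Int)) = fd := by omega
  rw [hc] at h
  rw [h]
  congr 2
  omega

-- list(range(n)).pop() returns n-1 and leaves range(n-1)
theorem pv_pop_last (n : Int) (h : 0 < n) :
    PySem.List.pop? (PySem.List.pyRange 0 n 1) (-1)
      = some (n - 1, PySem.List.pyRange 0 (n - 1) 1) := by
  have hsplit : PySem.List.pyRange 0 n 1 = PySem.List.pyRange 0 (n-1) 1 ++ [n-1] := by
    have := PySem.List.pyRange_one_succ_right (a := 0) (b := n - 1) (by omega)
    simpa using this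
  rw [hsplit, PySem.List.pop?_last]

-- ===== VERDICT (by name: the statement is the Claim_ definition above) =====
theorem get_permute_dims_spec : Claim_equal_get_permute_dims := by
  intro ndims feature_dim _ hpre
  unfold Pre_get_permute_dims at hpre
  simp only [] at hpre
  unfold Spec_get_permute_dims get_permute_dims get_permute_dims_alt
  simp only []
  set fd := if feature_dim < 0 then feature_dim + ndims else feature_dim with hfd
  obtain ⟨h0, h1⟩ := hpre
  have hn : (0:Int) < ndims := lt_of_le_of_lt h0 h1
  rw [if_pos ⟨h0, h1⟩, if_pos ⟨h0, h1⟩]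
  rw [pv_pop_fd ndims fd h0 h1, pv_pop_last ndims hn]
  simp only [Prod.mk.injEq]
  constructor
  · rw [pv_filter_range ndims fd h0 h1]
  · have hle : fd.toNat ≤ (PySem.List.pyRange 0 (ndims - 1) 1).length := by
      simp [PySem.List.length_pyRange_one]; omega
    have hc : fd = ((fd.toNat : Int)) := by omega
    rw [hc, PySem.List.insert_natCast _ _ _ hle, ← hc]
    obtain ⟨ht, hd⟩ := pv_take_drop (ndims - 1) fd h0 (by omega)
    rw [ht, hd, pv_map_sub]
    simp
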